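-- pv_equiv track=rewrite | github.com/skvcool-rgb/KOS-Organism | kos/grid_primitives.py | ray_fill_right
-- ===== SOURCE A (Python) =====
-- from typing import Any, Callable, Dict, List, Tuple
-- from collections import Counter
--
-- Grid = List[List[int]]
--
-- def color_counts(g: Grid) -> Counter:
--     return Counter(c for row in g for c in row)
--
-- def ray_fill_right(g: Grid) -> Grid:
--     """Extend each non-bg color rightward until hitting another non-bg cell or edge."""
--     if not g or not g[0]: return g
--     bg = color_counts(g).most_common(1)[0][0]
--     rows, cols = len(g), len(g[0])
--     result = [row[:] for row in g]
--     for i in range(rows):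
--         for j in range(cols):
--             if g[i][j] != bg:
--                 # Fill rightward
--                 for k in range(j+1, cols):
--                     if g[i][k] != bg:
--                         break
--                     result[i][k] = g[i][j]
--     return result
-- ===== SOURCE B (Python) =====
-- from collections import Counter
--
-- def ray_fill_right(g):
--     """Single left-to-right pass per row tracking the last non-bg color."""
--     if not g or not g[0]:
--         return g
--     bg = Counter(c for row in g for c in row).most_common(1)[0][0]
--     cols = len(g[0])
--     out = []
--     for row in g:
--         new = row[:]
--         last = None
--         for j in range(cols):
--             c = row[j]
--             if c != bg:
--                 last = c
--             elif last is not None: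
--                 new[j] = last
--         out.append(new)
--     return out
-- ===== Notes on version B (the rewrite author's own statement) =====
-- stated objective: faster
-- what changed: A re-scans rightward from every non-bg cell (nested k-loop); B makes a single left-to-right pass per row that tracks the last non-bg color and fills each bg cell from it.
import Mathlib
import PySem

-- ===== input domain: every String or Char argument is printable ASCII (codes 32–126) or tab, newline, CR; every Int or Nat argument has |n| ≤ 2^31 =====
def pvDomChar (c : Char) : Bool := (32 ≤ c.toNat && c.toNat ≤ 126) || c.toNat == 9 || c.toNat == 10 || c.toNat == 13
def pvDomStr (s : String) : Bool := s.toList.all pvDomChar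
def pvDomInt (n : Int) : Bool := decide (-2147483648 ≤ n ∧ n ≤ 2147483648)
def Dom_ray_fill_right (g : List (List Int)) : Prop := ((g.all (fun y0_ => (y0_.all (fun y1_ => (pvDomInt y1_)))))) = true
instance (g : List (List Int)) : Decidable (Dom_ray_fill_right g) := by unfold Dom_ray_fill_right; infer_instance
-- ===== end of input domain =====

-- B replaces A's quadratic rightward-fill scan per non-bg cell by one left-to-right
-- pass per row that tracks the last non-bg color (objective: faster, asymptotic).

-- ===== PORT A =====
-- bg = color_counts(g).most_common(1)[0][0]: most frequent color, ties broken by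
-- first occurrence in row-major order (CPython's Counter/heapq.nlargest behaviour).
-- Shared by both ports: B's Python computes bg by the identical expression.
def pvBg (g : List (List Int)) : Int :=
  let cnt := PySem.Dict.counter (g.flatMap (fun r => r))
  match cnt.items.foldl
      (fun (best : Option (Int × Int)) kv =>
        match best with
        | none => some kv
        | some b => if kv.2 > b.2 then some kv else best) none with
  | some (k, _) => k
  | none => 0

-- inner loop: 'for k in range(j+1, cols): if g[i][k] != bg: break; result[i][k] = v'
def pvFill (bg v : Int) (row res : List Int) (cols k : Nat) : List Int :=
  if _h : k < cols then
    if row.getD k 0 ≠ bg then res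
    else pvFill bg v row (res.set k v) cols (k + 1)
  else res
termination_by cols - k

-- 'for j in range(cols): if g[i][j] != bg: fill rightward'
def pvRowA (bg : Int) (row : List Int) (cols j : Nat) (res : List Int) : List Int :=
  if _h : j < cols then
    pvRowA bg row cols (j + 1)
      (if row.getD j 0 ≠ bg then pvFill bg (row.getD j 0) row res cols (j + 1) else res)
  else res
termination_by cols - j

def ray_fill_right (g : List (List Int)) : List (List Int) :=
  match g with
  | [] => g
  | r0 :: _ =>
    if r0 = [] then g
    else
      let bg := pvBg g
      let cols := r0.length
      g.map (fun row => pvRowA bg row cols 0 row)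

-- ===== PORT B =====
-- one pass per row, tracking the last non-bg color seen so far
def pvRowB (bg : Int) (row : List Int) (cols j : Nat) (res : List Int) (last : Option Int) : List Int :=
  if _h : j < cols then
    let c := row.getD j 0
    if c ≠ bg then pvRowB bg row cols (j + 1) res (some c)
    else
      match last with
      | some l => pvRowB bg row cols (j + 1) (res.set j l) last
      | none => pvRowB bg row cols (j + 1) res none
  else res
termination_by cols - j

def ray_fill_right_alt (g : List (List Int)) : List (List Int) :=
  match g with
  | [] => g
  | r0 :: _ =>
    if r0 = [] then g
    else
      let bg := pvBg g
      let cols := r0.length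
      g.map (fun row => pvRowB bg row cols 0 row none)

-- ===== PRECONDITION & SPEC =====
-- Pre_ excludes ragged grids with a row shorter than row 0: there both A and B
-- raise IndexError (g[i][j] for j < len(g[0])).
def Pre_ray_fill_right (g : List (List Int)) : Prop :=
  ∀ row ∈ g, (g.headD []).length ≤ row.length
instance (g : List (List Int)) : Decidable (Pre_ray_fill_right g) := by
  unfold Pre_ray_fill_right; infer_instance

def pvWitness_ray_fill_right : List (List Int) := [[1, 0, 0], [0, 2, 0]]

def Spec_ray_fill_right (g : List (List Int)) (out : List (List Int)) : Prop := out = ray_fill_right_alt g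
instance (g : List (List Int)) (out : List (List Int)) : Decidable (Spec_ray_fill_right g out) := by unfold Spec_ray_fill_right; infer_instance

-- ===== CLAIM (what is proved, stated in full; the proofs are below) =====
def Claim_equal_ray_fill_right : Prop := ∀ (g : List (List Int)), Dom_ray_fill_right g → Pre_ray_fill_right g → Spec_ray_fill_right g (ray_fill_right g)

-- ===== LEMMAS AND PROOFS =====

-- After A fills rightward from k with value v, continuing A's outer loop at k equals
-- continuing B's pass at k carrying 'last = some v'.
theorem rowA_fill_eq (bg v : Int) (row : List Int) (cols k : Nat) (res : List Int) :
    pvRowA bg row cols k (pvFill bg v row res cols k) = pvRowB bg row cols k res (some v) := by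
  by_cases h : k < cols
  · by_cases hc : row.getD k 0 ≠ bg
    · rw [pvFill, dif_pos h, if_pos hc, pvRowA, dif_pos h, if_pos hc, pvRowB, dif_pos h]
      simp only [if_pos hc]
      exact rowA_fill_eq bg (row.getD k 0) row cols (k + 1) res
    · rw [pvFill, dif_pos h, if_neg hc, pvRowA, dif_pos h, if_neg hc, pvRowB, dif_pos h]
      simp only [if_neg hc]
      exact rowA_fill_eq bg v row cols (k + 1) (res.set k v)
  · rw [pvFill, pvRowA, pvRowB]
    simp [h]
termination_by cols - k
decreasing_by all_goals omega

theorem rowA_eq_rowB (bg : Int) (row : List Int) (cols j : Nat) (res : List Int) :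
    pvRowA bg row cols j res = pvRowB bg row cols j res none := by
  by_cases h : j < cols
  · by_cases hc : row.getD j 0 ≠ bg
    · rw [pvRowA, dif_pos h, if_pos hc, pvRowB, dif_pos h]
      simp only [if_pos hc]
      exact rowA_fill_eq bg (row.getD j 0) row cols (j + 1) res
    · rw [pvRowA, dif_pos h, if_neg hc, pvRowB, dif_pos h]
      simp only [if_neg hc]
      exact rowA_eq_rowB bg row cols (j + 1) res
  · rw [pvRowA, pvRowB]
    simp [h]
termination_by cols - j
decreasing_by all_goals omega

-- ===== VERDICT (by name: the statement is the Claim_ definition above) =====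
theorem ray_fill_right_spec : Claim_equal_ray_fill_right := by
  intro g _ _
  unfold Spec_ray_fill_right ray_fill_right ray_fill_right_alt
  cases g with
  | nil => rfl
  | cons r0 rest =>
    by_cases h0 : r0 = []
    · simp [h0]
    · simp only []
      rw [if_neg h0, if_neg h0]
      exact List.map_congr_left fun row _ => rowA_eq_rowB _ row _ 0 row
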